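-- pv_equiv track=rewrite | github.com/Vagacoder/Codesignal | python/Arcade/Core/C95RunnersMeetings.py | runnersMeetings
-- ===== SOURCE A (Python) =====
-- def runnersMeetings(startPosition: list, speed: list) -> int:
--     n = len(startPosition)
--     startPosition = [p*60 for p in startPosition]
--     maxTime = 1200000
--     t = 0
--     count = 0
--     while t < maxTime:
--         startPosition = [p+speed[i] for i, p in enumerate(startPosition)]
--         curCount = n - len(set(startPosition)) + 1
--         count = max(count, curCount)
--         t += 1
--
--     if count == 1:
--         return -1
--     else:
--         return count
-- ===== SOURCE B (Python) =====
-- def _meet(si, sj, vi, vj, maxTime):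
--     # exact integer meeting time of two runners (positions scaled by 60), if any
--     dv = vj - vi
--     if dv == 0:
--         return []
--     num = 60 * (si - sj)
--     if num % dv != 0:
--         return []
--     t = num // dv
--     return [t] if 1 <= t <= maxTime else []
--
--
-- def _dupCount(startPosition, speed, n, t):
--     positions = {60 * startPosition[k] + t * speed[k] for k in range(n)}
--     return n - len(positions) + 1
--
--
-- def runnersMeetings(startPosition: list, speed: list) -> int:
--     n = len(startPosition)
--     maxTime = 1200000
--     cands = [1] + [t for i in range(n) for j in range(i + 1, n)
--                    for t in _meet(startPosition[i], startPosition[j],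
--                                   speed[i], speed[j], maxTime)]
--     best = 1
--     for t in cands:
--         best = max(best, _dupCount(startPosition, speed, n, t))
--     return -1 if best == 1 else best
-- ===== Notes on version B (the rewrite author's own statement) =====
-- stated objective: faster
-- what changed: Instead of simulating all 1,200,000 time steps and counting duplicates at each (O(maxTime*n)), B computes the exact integer meeting time of every pair of runners from the linear-motion equation, and evaluates the duplicate count only at those O(n^2) candidate times (plus t=1, which covers permanently-coinciding pairs).
import Mathlib
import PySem

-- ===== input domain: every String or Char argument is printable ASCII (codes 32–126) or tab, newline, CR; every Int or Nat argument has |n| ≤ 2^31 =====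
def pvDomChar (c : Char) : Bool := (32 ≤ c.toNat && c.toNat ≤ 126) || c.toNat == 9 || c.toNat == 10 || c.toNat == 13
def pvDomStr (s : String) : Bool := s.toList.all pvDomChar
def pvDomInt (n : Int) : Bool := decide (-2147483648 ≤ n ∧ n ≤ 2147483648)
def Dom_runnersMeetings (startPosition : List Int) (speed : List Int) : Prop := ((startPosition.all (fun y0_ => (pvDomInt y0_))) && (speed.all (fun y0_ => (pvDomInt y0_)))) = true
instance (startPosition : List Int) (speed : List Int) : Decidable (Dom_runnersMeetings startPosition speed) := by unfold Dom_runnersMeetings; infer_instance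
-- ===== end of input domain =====

-- B replaces the 1,200,000-step simulation by evaluating the duplicate count only at the
-- integer pair-meeting times computed from the motion equations (plus t = 1), which is
-- asymptotically faster; return values agree everywhere A returns.

-- ===== PORT A =====
-- loop body of A's while-loop: positions are updated by one speed step, then duplicates counted
def pvStepA (speed : List Int) (n : Int) (st : List Int × Int) : List Int × Int :=
  let ps := (PySem.List.enumerate st.1).map (fun ip => ip.2 + PySem.List.pyGetD speed ip.1 0)
  let cur : Int := n - ((PySem.Set.ofList ps).length : Int) + 1
  (ps, max st.2 cur)

def runnersMeetings (startPosition : List Int) (speed : List Int) : Int :=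
  let n : Int := startPosition.length
  let sp0 := startPosition.map (fun p => p * 60)
  let maxTime : Int := 1200000
  let st := (PySem.List.pyRange 0 maxTime 1).foldl (fun st _ => pvStepA speed n st) (sp0, 0)
  if st.2 = 1 then -1 else st.2

-- ===== PORT B =====
-- _meet from Source B: the (unique) integer meeting time of runners i, j if it exists and is in range
def pvMeet (si sj vi vj maxTime : Int) : List Int :=
  let dv := vj - vi
  if dv = 0 then []
  else
    let num := 60 * (si - sj)
    if PySem.Int.mod num dv ≠ 0 then []
    else
      let t := PySem.Int.floordiv num dv
      if 1 ≤ t ∧ t ≤ maxTime then [t] else []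

-- _dupCount from Source B
def pvDupCount (startPosition speed : List Int) (n : Nat) (t : Int) : Int :=
  let positions := PySem.Set.ofList ((List.range n).map
      (fun k => 60 * startPosition.getD k 0 + t * speed.getD k 0))
  (n : Int) - (positions.length : Int) + 1

def runnersMeetings_alt (startPosition : List Int) (speed : List Int) : Int :=
  let n := startPosition.length
  let maxTime : Int := 1200000
  let cands : List Int := 1 :: (List.range n).flatMap (fun i =>
      (List.range' (i+1) (n - (i+1))).flatMap (fun j =>
        pvMeet (startPosition.getD i 0) (startPosition.getD j 0)
               (speed.getD i 0) (speed.getD j 0) maxTime))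
  let best := cands.foldl (fun b t => max b (pvDupCount startPosition speed n t)) 1
  if best = 1 then -1 else best

-- ===== PRECONDITION & SPEC =====
-- Pre_ excludes exactly the inputs where speed is shorter than startPosition: there A (and B)
-- raises IndexError on speed[i].
def Pre_runnersMeetings (startPosition : List Int) (speed : List Int) : Prop :=
  startPosition.length ≤ speed.length
instance (startPosition : List Int) (speed : List Int) : Decidable (Pre_runnersMeetings startPosition speed) := by unfold Pre_runnersMeetings; infer_instance
def pvWitness_runnersMeetings : List Int × List Int := ([1, 2], [2, 1])

def Spec_runnersMeetings (startPosition : List Int) (speed : List Int) (out : Int) : Prop := out = runnersMeetings_alt startPosition speed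
instance (startPosition : List Int) (speed : List Int) (out : Int) : Decidable (Spec_runnersMeetings startPosition speed out) := by unfold Spec_runnersMeetings; infer_instance

-- ===== CLAIM (what is proved, stated in full; the proofs are below) =====
def Claim_equal_runnersMeetings : Prop := ∀ (startPosition : List Int) (speed : List Int), Dom_runnersMeetings startPosition speed → Pre_runnersMeetings startPosition speed → Spec_runnersMeetings startPosition speed (runnersMeetings startPosition speed)

-- ===== LEMMAS AND PROOFS =====

-- position of runner k at time t (scaled by 60), and the whole position list
def pvPosF (s v : List Int) (t : Int) (k : Nat) : Int := 60 * s.getD k 0 + t * v.getD k 0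
def pvPos (s v : List Int) (t : Int) : List Int := (List.range s.length).map (pvPosF s v t)

-- A's running count after k loop iterations
def pvCnt (s v : List Int) : Nat → Int
  | 0 => 0
  | k + 1 => max (pvCnt s v k) (pvDupCount s v s.length ((k : Int) + 1))

-- the candidate list of B's port
def pvCands (s v : List Int) : List Int :=
  1 :: (List.range s.length).flatMap (fun i =>
      (List.range' (i+1) (s.length - (i+1))).flatMap (fun j =>
        pvMeet (s.getD i 0) (s.getD j 0) (v.getD i 0) (v.getD j 0) 1200000))

def pvBest (s v : List Int) : Int :=
  (pvCands s v).foldl (fun b t => max b (pvDupCount s v s.length t)) 1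

lemma alt_eq (s v : List Int) :
    runnersMeetings_alt s v = if pvBest s v = 1 then -1 else pvBest s v := rfl

lemma dup_eq_pos (s v : List Int) (t : Int) :
    pvDupCount s v s.length t
      = (s.length : Int) - ((PySem.Set.ofList (pvPos s v t)).length : Int) + 1 := rfl

-- (Set.ofList l).length is the Finset cardinality of l's elements
lemma ofList_length_eq_card (l : List Int) :
    (PySem.Set.ofList l).length = l.toFinset.card := by
  have hn : (PySem.Set.ofList l).Nodup := PySem.Set.nodup_ofList l
  have h1 : (PySem.Set.ofList l).toFinset = l.toFinset := by
    ext x; simp [List.mem_toFinset, PySem.Set.mem_ofList]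
  rw [← List.toFinset_card_of_nodup hn, h1]

lemma pos_toFinset (s v : List Int) (t : Int) :
    (pvPos s v t).toFinset = (Finset.range s.length).image (pvPosF s v t) := by
  ext x
  simp [pvPos, List.mem_toFinset, List.mem_map, List.mem_range, Finset.mem_image,
    Finset.mem_range]

def pvCard (s v : List Int) (t : Int) : Nat :=
  ((Finset.range s.length).image (pvPosF s v t)).card

lemma dup_eq_card (s v : List Int) (t : Int) :
    pvDupCount s v s.length t = (s.length : Int) - (pvCard s v t : Int) + 1 := by
  rw [dup_eq_pos, ofList_length_eq_card, pos_toFinset]; rfl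

lemma card_le_n (s v : List Int) (t : Int) : pvCard s v t ≤ s.length := by
  unfold pvCard
  exact Finset.card_image_le.trans (by simp)

lemma one_le_dup (s v : List Int) (t : Int) : 1 ≤ pvDupCount s v s.length t := by
  have := card_le_n s v t
  rw [dup_eq_card]; omega

-- the step of A's loop advances the position list by one time unit
lemma step_pos (s v : List Int) (h : s.length ≤ v.length) (t : Int) (c : Int) :
    pvStepA v (s.length : Int) (pvPos s v t, c)
      = (pvPos s v (t+1), max c (pvDupCount s v s.length (t+1))) := by
  have hps : (PySem.List.enumerate (pvPos s v t)).map
      (fun ip => ip.2 + PySem.List.pyGetD v ip.1 0) = pvPos s v (t+1) := by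
    apply List.ext_getElem
    · simp [pvPos, PySem.List.length_enumerate]
    · intro k hk1 hk2
      have hk : k < s.length := by
        simpa [pvPos, PySem.List.length_enumerate] using hk1
      have hkv : k < v.length := lt_of_lt_of_le hk h
      simp [PySem.List.getElem_enumerate, pvPos, pvPosF, List.getD_eq_getElem, hk, hkv]
      ring
  unfold pvStepA
  simp only [hps, dup_eq_pos]

lemma pos_zero (s v : List Int) : s.map (fun p => p * 60) = pvPos s v 0 := by
  apply List.ext_getElem
  · simp [pvPos]
  · intro k hk1 hk2
    have hk : k < s.length := by simpa using hk1
    simp [pvPos, pvPosF, List.getD_eq_getElem, hk]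
    ring

lemma A_fold (s v : List Int) (h : s.length ≤ v.length) (k : Nat) :
    (PySem.List.pyRange 0 (k : Int) 1).foldl
        (fun st _ => pvStepA v (s.length : Int) st) (s.map (fun p => p * 60), 0)
      = (pvPos s v (k : Int), pvCnt s v k) := by
  induction k with
  | zero =>
    rw [PySem.List.pyRange_one_eq_nil (by norm_num)]
    simp [pvCnt, pos_zero s v]
  | succ k ih =>
    have hc : ((k + 1 : Nat) : Int) = (k : Int) + 1 := by push_cast; ring
    rw [hc, PySem.List.pyRange_one_succ_right (by positivity), List.foldl_append, ih]
    simp only [List.foldl_cons, List.foldl_nil]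
    rw [step_pos s v h (k : Int) (pvCnt s v k)]
    simp [pvCnt]

lemma A_eq (s v : List Int) (h : s.length ≤ v.length) :
    runnersMeetings s v
      = if pvCnt s v 1200000 = 1 then -1 else pvCnt s v 1200000 := by
  have hc : (1200000 : Int) = ((1200000 : Nat) : Int) := by norm_num
  simp only [runnersMeetings, hc, A_fold s v h 1200000]

-- duplicate count is monotone under the fold: pvG t ≤ pvCnt k for 1 ≤ t ≤ k
lemma dup_le_cnt (s v : List Int) (k : Nat) :
    ∀ (t : Int), 1 ≤ t → t ≤ (k : Int) → pvDupCount s v s.length t ≤ pvCnt s v k := by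
  induction k with
  | zero =>
    intro t h1 h2
    exfalso; omega
  | succ k ih =>
    intro t h1 h2
    by_cases hc : t = (k : Int) + 1
    · subst hc
      simpa [pvCnt] using le_max_right (pvCnt s v k) (pvDupCount s v s.length ((k : Int) + 1))
    · have ht : t ≤ (k : Int) := by push_cast at h2; omega
      exact le_trans (ih t h1 ht)
        (by simpa [pvCnt] using le_max_left (pvCnt s v k) (pvDupCount s v s.length ((k : Int) + 1)))

-- foldl-max upper bound
lemma foldl_max_le (f : Int → Int) (B : Int) :
    ∀ (l : List Int) (init : Int), init ≤ B → (∀ x ∈ l, f x ≤ B) →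
      l.foldl (fun b t => max b (f t)) init ≤ B
  | [], _, h0, _ => h0
  | a :: l, init, h0, h =>
    foldl_max_le f B l _ (max_le h0 (h a List.mem_cons_self))
      (fun x hx => h x (List.mem_cons_of_mem _ hx))

-- membership characterisation of pvMeet
lemma mem_meet_bounds (si sj vi vj M t : Int) (h : t ∈ pvMeet si sj vi vj M) :
    1 ≤ t ∧ t ≤ M := by
  by_cases hdv : vj - vi = 0
  · simp [pvMeet, hdv] at h
  · by_cases hm : PySem.Int.mod (60 * (si - sj)) (vj - vi) = 0
    · by_cases hr : 1 ≤ PySem.Int.floordiv (60 * (si - sj)) (vj - vi) ∧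
          PySem.Int.floordiv (60 * (si - sj)) (vj - vi) ≤ M
      · simp [pvMeet, hdv, hm, hr] at h
        omega
      · simp [pvMeet, hdv, hm, hr] at h
    · simp [pvMeet, hdv, hm] at h

lemma meet_complete (si sj vi vj M t : Int) (hv : vi ≠ vj)
    (heq : 60 * si + t * vi = 60 * sj + t * vj) (h1 : 1 ≤ t) (h2 : t ≤ M) :
    t ∈ pvMeet si sj vi vj M := by
  have hdv : vj - vi ≠ 0 := sub_ne_zero.mpr (Ne.symm hv)
  have hkey : t * (vj - vi) = 60 * (si - sj) := by linear_combination -heq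
  have hdvd : (vj - vi) ∣ 60 * (si - sj) := ⟨t, by rw [← hkey]; ring⟩
  have hmod : PySem.Int.mod (60 * (si - sj)) (vj - vi) = 0 :=
    (PySem.Int.mod_eq_zero_iff_dvd _ _).mpr hdvd
  have hfd : PySem.Int.floordiv (60 * (si - sj)) (vj - vi) = t := by
    have h0 := PySem.Int.floordiv_mul_add_mod (60 * (si - sj)) (vj - vi)
    rw [hmod, add_zero] at h0
    have : PySem.Int.floordiv (60 * (si - sj)) (vj - vi) * (vj - vi) = t * (vj - vi) := by
      rw [h0, hkey]
    exact mul_right_cancel₀ hdv this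
  simp [pvMeet, hdv, hmod, hfd, h1, h2]

-- coarser coincidence relation ⇒ at most as many distinct values
lemma card_image_le_of_compat (n : Nat) (f g : Nat → Int)
    (h : ∀ i < n, ∀ j < n, f i = f j → g i = g j) :
    ((Finset.range n).image g).card ≤ ((Finset.range n).image f).card := by
  classical
  apply Finset.card_le_card_of_surjOn
    (fun x => if hx : ∃ i, i < n ∧ f i = x then g hx.choose else 0)
  intro y hy
  simp only [Finset.coe_image, Set.mem_image, Finset.mem_coe, Finset.mem_image,
    Finset.mem_range] at hy ⊢
  obtain ⟨j, hj, hgj⟩ := hy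
  refine ⟨f j, ⟨j, hj, rfl⟩, ?_⟩
  have hex : ∃ i, i < n ∧ f i = f j := ⟨j, hj, rfl⟩
  rw [dif_pos hex]
  obtain ⟨hi, hfi⟩ := hex.choose_spec
  rw [h _ hi _ hj hfi, hgj]

lemma mem_cands_of_meet (s v : List Int) (i j : Nat) (hij : i < j) (hj : j < s.length)
    (t : Int) (ht : t ∈ pvMeet (s.getD i 0) (s.getD j 0) (v.getD i 0) (v.getD j 0) 1200000) :
    t ∈ pvCands s v := by
  unfold pvCands
  refine List.mem_cons_of_mem _ ?_
  rw [List.mem_flatMap]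
  refine ⟨i, List.mem_range.mpr (lt_trans hij hj), ?_⟩
  rw [List.mem_flatMap]
  exact ⟨j, List.mem_range'_1.mpr ⟨by omega, by omega⟩, ht⟩

lemma dup_le_best (s v : List Int) (t : Int) (ht : t ∈ pvCands s v) :
    pvDupCount s v s.length t ≤ pvBest s v :=
  (PySem.List.le_foldl_max_int (pvCands s v) (fun t => pvDupCount s v s.length t) 1).2 t ht

lemma one_le_best (s v : List Int) : 1 ≤ pvBest s v :=
  (PySem.List.le_foldl_max_int (pvCands s v) (fun t => pvDupCount s v s.length t) 1).1

-- core: every time step's duplicate count is dominated by some candidate's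
lemma dup_le_best_all (s v : List Int)
    (t : Int) (h1 : 1 ≤ t) (h2 : t ≤ 1200000) :
    pvDupCount s v s.length t ≤ pvBest s v := by
  by_cases hd : pvDupCount s v s.length t ≤ 1
  · exact le_trans hd (one_le_best s v)
  · by_cases hvex : ∃ i j, i < j ∧ j < s.length ∧ pvPosF s v t i = pvPosF s v t j ∧
        v.getD i 0 ≠ v.getD j 0
    · obtain ⟨i, j, hij, hj, hfe, hvne⟩ := hvex
      have hmem := meet_complete (s.getD i 0) (s.getD j 0) (v.getD i 0) (v.getD j 0)
        1200000 t hvne (by simpa [pvPosF] using hfe) h1 h2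
      exact dup_le_best s v t (mem_cands_of_meet s v i j hij hj t hmem)
    · push_neg at hvex
      have hcompat : ∀ i < s.length, ∀ j < s.length,
          pvPosF s v t i = pvPosF s v t j → pvPosF s v 1 i = pvPosF s v 1 j := by
        intro i hi j hj hfe
        rcases Nat.lt_trichotomy i j with hlt | heqij | hgt
        · have hveq := hvex i j hlt hj hfe
          unfold pvPosF at hfe ⊢
          rw [hveq] at hfe ⊢
          have : s.getD i 0 = s.getD j 0 := by linarith
          rw [this]
        · rw [heqij]
        · have hveq := hvex j i hgt hi hfe.symm
          unfold pvPosF at hfe ⊢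
          rw [hveq] at hfe ⊢
          have : s.getD i 0 = s.getD j 0 := by linarith
          rw [this]
      have hcard2 := card_image_le_of_compat s.length (pvPosF s v t) (pvPosF s v 1) hcompat
      have hstep : pvDupCount s v s.length t ≤ pvDupCount s v s.length 1 := by
        rw [dup_eq_card, dup_eq_card]
        have : pvCard s v 1 ≤ pvCard s v t := hcard2
        omega
      exact le_trans hstep (dup_le_best s v 1 (List.mem_cons_self))

lemma cnt_le_best (s v : List Int) (k : Nat) (hk : (k : Int) ≤ 1200000) :
    pvCnt s v k ≤ pvBest s v := by
  induction k with
  | zero => simpa [pvCnt] using le_trans zero_le_one (one_le_best s v)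
  | succ k ih =>
    have hk' : ((k : Nat) : Int) ≤ 1200000 := by push_cast at hk; omega
    have hd := dup_le_best_all s v ((k : Int) + 1) (by omega) (by push_cast at hk; omega)
    simpa [pvCnt] using max_le (ih hk') hd

lemma best_le_cnt (s v : List Int) : pvBest s v ≤ pvCnt s v 1200000 := by
  unfold pvBest
  apply foldl_max_le
  · have := one_le_dup s v 1
    have := dup_le_cnt s v 1200000 1 le_rfl (by norm_num)
    omega
  · intro c hc
    rcases List.mem_cons.mp hc with rfl | hc2
    · exact dup_le_cnt s v 1200000 1 le_rfl (by norm_num)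
    · rw [List.mem_flatMap] at hc2
      obtain ⟨i, _, hc3⟩ := hc2
      rw [List.mem_flatMap] at hc3
      obtain ⟨j, _, hc4⟩ := hc3
      obtain ⟨hb1, hb2⟩ := mem_meet_bounds _ _ _ _ _ _ hc4
      exact dup_le_cnt s v 1200000 c hb1 (by exact_mod_cast hb2)

lemma main_eq (s v : List Int) :
    pvCnt s v 1200000 = pvBest s v :=
  le_antisymm (cnt_le_best s v 1200000 (by norm_num)) (best_le_cnt s v)

-- ===== VERDICT (by name: the statement is the Claim_ definition above) =====
theorem runnersMeetings_spec : Claim_equal_runnersMeetings := by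
  intro s v _ hpre
  unfold Spec_runnersMeetings
  rw [A_eq s v hpre, alt_eq, main_eq s v]
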